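-- pv_equiv track=rewrite | github.com/CheickDiakite-yikes/gemma-local-expert | scripts/smoke_workspace_agent.py | grounded_refinement
-- ===== SOURCE A (Python) =====
-- def grounded_refinement(title: str, content: str) -> tuple[str, str]:
--     refined_title = f"{title} (reviewed)"
--     lines = [line.strip() for line in content.splitlines() if line.strip()]
--     files_reviewed_start = next((index for index, line in enumerate(lines) if line.lower().startswith("files reviewed:")), None)
--     if files_reviewed_start is not None:
--         keep = lines[: files_reviewed_start + 2]
--     else:
--         keep = lines[:4]
--     refined_content = "\n".join(keep).strip()
--     return refined_title, refined_content
-- ===== SOURCE B (Python) =====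
-- def grounded_refinement(title: str, content: str) -> tuple[str, str]:
--     refined_title = f"{title} (reviewed)"
--     kept = []
--     found = False
--     for raw in content.splitlines():
--         line = raw.strip()
--         if not line:
--             continue
--         if found:
--             kept.append(line)
--             break
--         kept.append(line)
--         if line.lower().startswith("files reviewed:"):
--             found = True
--     if not found:
--         kept = kept[:4]
--     return refined_title, "\n".join(kept).strip()
-- ===== Notes on version B (the rewrite author's own statement) =====
-- stated objective: alternative
-- what changed: Replaces A's build-the-full-filtered-list, enumerate/next() search and slice pipeline with a single fused pass over the raw lines that strips, skips empties, collects kept lines and breaks one kept line after the marker, truncating to four only when no marker was found.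
import Mathlib
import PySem

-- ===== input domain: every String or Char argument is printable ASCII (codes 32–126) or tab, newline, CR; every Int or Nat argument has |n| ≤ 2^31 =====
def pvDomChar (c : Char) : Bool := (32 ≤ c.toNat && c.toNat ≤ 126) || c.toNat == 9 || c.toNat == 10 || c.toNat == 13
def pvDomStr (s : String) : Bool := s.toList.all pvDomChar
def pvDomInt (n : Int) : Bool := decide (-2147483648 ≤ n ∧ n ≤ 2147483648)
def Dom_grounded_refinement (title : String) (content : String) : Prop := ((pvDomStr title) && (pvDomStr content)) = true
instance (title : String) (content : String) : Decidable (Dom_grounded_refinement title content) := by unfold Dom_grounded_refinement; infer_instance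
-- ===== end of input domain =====

-- B replaces A's build-filtered-list / enumerate-search / slice pipeline by a single fused pass with a
-- found flag and early break (objective: alternative decomposition, same cost).

-- ===== PORT A =====
def grounded_refinement (title : String) (content : String) : String × String :=
  let refinedTitle := title ++ " (reviewed)"
  let lines := (PySem.Str.splitlines content).filterMap
    (fun line => let s := PySem.Str.strip line; if s = "" then none else some s)
  match List.find? (fun p => PySem.Str.startswith (PySem.Str.lower p.2) "files reviewed:")
      (PySem.List.enumerate lines 0) with
  | some (i, _) =>
      (refinedTitle, PySem.Str.strip (PySem.Str.join "\n" (PySem.List.slice lines none (some (i + 2)))))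
  | none =>
      (refinedTitle, PySem.Str.strip (PySem.Str.join "\n" (PySem.List.slice lines none (some 4))))

-- ===== PORT B =====
-- B's loop: strip each raw line, skip empties, append it; after the marker line append at most one
-- more kept line and break.  Returns (kept lines, found flag).
def grbLoop : List String → Bool → List String × Bool
  | [], found => ([], found)
  | raw :: rest, found =>
      let line := PySem.Str.strip raw
      if line = "" then grbLoop rest found
      else if found then ([line], true)
      else
        let found' := PySem.Str.startswith (PySem.Str.lower line) "files reviewed:"
        let r := grbLoop rest found'
        (line :: r.1, r.2)

def grounded_refinement_alt (title : String) (content : String) : String × String :=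
  let refinedTitle := title ++ " (reviewed)"
  let r := grbLoop (PySem.Str.splitlines content) false
  let kept := if r.2 then r.1 else PySem.List.slice r.1 none (some 4)
  (refinedTitle, PySem.Str.strip (PySem.Str.join "\n" kept))

-- ===== PRECONDITION & SPEC =====
def Spec_grounded_refinement (title : String) (content : String) (out : String × String) : Prop := out = grounded_refinement_alt title content
instance (title : String) (content : String) (out : String × String) : Decidable (Spec_grounded_refinement title content out) := by unfold Spec_grounded_refinement; infer_instance

-- ===== CLAIM (what is proved, stated in full; the proofs are below) =====
def Claim_equal_grounded_refinement : Prop := ∀ (title : String) (content : String), Dom_grounded_refinement title content → Spec_grounded_refinement title content (grounded_refinement title content)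

-- ===== LEMMAS AND PROOFS =====

def pvMarker (l : String) : Bool := PySem.Str.startswith (PySem.Str.lower l) "files reviewed:"

def pvStrip? (raw : String) : Option String :=
  if PySem.Str.strip raw = "" then none else some (PySem.Str.strip raw)

-- B's fused loop, re-expressed on the already-filtered list of stripped nonempty lines.
def pvLoopS : List String → Bool → List String × Bool
  | [], found => ([], found)
  | l :: rest, found =>
      if found then ([l], true)
      else
        let r := pvLoopS rest (pvMarker l)
        (l :: r.1, r.2)

theorem grbLoop_eq_loopS (raws : List String) (f : Bool) :
    grbLoop raws f = pvLoopS (raws.filterMap pvStrip?) f := by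
  induction raws generalizing f with
  | nil => rfl
  | cons raw rest ih =>
      simp only [grbLoop, List.filterMap_cons]
      by_cases h : PySem.Str.strip raw = ""
      · have e : pvStrip? raw = none := by simp [pvStrip?, h]
        simp [e, h, ih]
      · have e : pvStrip? raw = some (PySem.Str.strip raw) := by simp [pvStrip?, h]
        simp [e, h, pvLoopS, pvMarker, ih]

theorem loopS_true (ls : List String) : pvLoopS ls true = (ls.take 1, true) := by
  cases ls <;> simp [pvLoopS]

theorem loopS_snd (ls : List String) :
    (pvLoopS ls false).2 = (List.findIdx? pvMarker ls).isSome := by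
  induction ls with
  | nil => rfl
  | cons l rest ih =>
      simp only [pvLoopS, List.findIdx?_cons]
      by_cases h : pvMarker l
      · simp [h, loopS_true]
      · simp [h, ih]

theorem loopS_fst (ls : List String) :
    (pvLoopS ls false).1 =
      (match List.findIdx? pvMarker ls with
       | some i => ls.take (i + 2)
       | none => ls) := by
  induction ls with
  | nil => rfl
  | cons l rest ih =>
      simp only [pvLoopS, List.findIdx?_cons]
      by_cases h : pvMarker l
      · simp [h, loopS_true]
      · simp only [h, ih]
        cases hr : List.findIdx? pvMarker rest <;> simp

-- A's first-marker search through enumerate, reduced to findIdx?.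
theorem find?_enumerate_eq (ls : List String) (s : Int) :
    List.find? (fun p => pvMarker p.2) (PySem.List.enumerate ls s) =
      (List.findIdx? pvMarker ls).map (fun i : Nat => (s + (i : Int), ls.getD i "")) := by
  induction ls generalizing s with
  | nil => rfl
  | cons l rest ih =>
      rw [PySem.List.enumerate_cons]
      simp only [List.find?_cons, List.findIdx?_cons]
      by_cases h : pvMarker l
      · simp [h]
      · simp only [h, Bool.false_eq_true, if_false, ih (s + 1)]
        cases hr : List.findIdx? pvMarker rest with
        | none => simp
        | some i =>
            simp only [Option.map_some, Option.some.injEq, Prod.mk.injEq]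
            constructor
            · push_cast; ring
            · simp

theorem keep_eq (ls : List String) :
    (match List.find? (fun p => pvMarker p.2) (PySem.List.enumerate ls 0) with
     | some (i, _) => PySem.List.slice ls none (some (i + 2))
     | none => PySem.List.slice ls none (some 4)) =
    (if (pvLoopS ls false).2 then (pvLoopS ls false).1
     else PySem.List.slice (pvLoopS ls false).1 none (some 4)) := by
  rw [find?_enumerate_eq, loopS_snd, loopS_fst]
  cases hr : List.findIdx? pvMarker ls with
  | none => simp
  | some i =>
      simp only [Option.map_some, zero_add, Option.isSome_some, if_true]
      have : ((i : Int) + 2) = ((i + 2 : Nat) : Int) := by push_cast; ring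
      rw [this, PySem.List.slice_to_natCast]

-- ===== VERDICT (by name: the statement is the Claim_ definition above) =====
theorem grounded_refinement_spec : Claim_equal_grounded_refinement := by
  intro title content _
  show grounded_refinement title content = grounded_refinement_alt title content
  simp only [grounded_refinement, grounded_refinement_alt]
  rw [grbLoop_eq_loopS]
  have e : List.filterMap pvStrip? (PySem.Str.splitlines content) =
      (PySem.Str.splitlines content).filterMap
        (fun line => let s := PySem.Str.strip line; if s = "" then none else some s) := rfl
  rw [e]
  have h := keep_eq ((PySem.Str.splitlines content).filterMap
    (fun line => let s := PySem.Str.strip line; if s = "" then none else some s))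
  simp only [pvMarker] at h
  rw [← h]
  cases hf : List.find? (fun p => PySem.Str.startswith (PySem.Str.lower p.2) "files reviewed:")
      (PySem.List.enumerate ((PySem.Str.splitlines content).filterMap
        (fun line => let s := PySem.Str.strip line; if s = "" then none else some s)) 0) with
  | none => rfl
  | some p => obtain ⟨i, snd⟩ := p; rfl
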